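-- pv_equiv track=rewrite | github.com/yashj1579/AdventOfCode2024 | Day7/prob1.py | rec
-- ===== SOURCE A (Python) =====
-- def rec(goal=1, x=[], pos=0):
--     if (goal < 0):
--         return False
--     if (pos <= 0):
--         return True if (goal == 0) else False
--     if goal / int(x[pos]) == goal // int(x[pos]):
--         return rec(goal - int(x[pos]), x, pos-1) | rec(goal // int(x[pos]), x, pos-1)
--     else:
--         return rec(goal - int(x[pos]), x, pos - 1)
-- ===== SOURCE B (Python) =====
-- def rec(goal=1, x=[], pos=0):
--     stack = [(goal, pos)]
--     while stack:
--         g, p = stack.pop()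
--         if g < 0:
--             continue
--         if p <= 0:
--             if g == 0:
--                 return True
--             continue
--         d = int(x[p])
--         if g / d == g // d:
--             stack.append((g // d, p - 1))
--         stack.append((g - d, p - 1))
--     return False
-- ===== Notes on version B (the rewrite author's own statement) =====
-- stated objective: alternative
-- what changed: Replaced A's non-short-circuiting binary recursion by an explicit worklist (a stack of (goal,pos) states) drained depth-first with an early return on the first state reaching goal==0 at pos<=0; the divisibility test is A's own float comparison g/d==g//d, so B returns A's exact value on every input where A returns; …
-- outside the precondition, e.g. on rec(1, ['pad', 'bad', '5'], 2): A returns False, B returns False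
import Mathlib
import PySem

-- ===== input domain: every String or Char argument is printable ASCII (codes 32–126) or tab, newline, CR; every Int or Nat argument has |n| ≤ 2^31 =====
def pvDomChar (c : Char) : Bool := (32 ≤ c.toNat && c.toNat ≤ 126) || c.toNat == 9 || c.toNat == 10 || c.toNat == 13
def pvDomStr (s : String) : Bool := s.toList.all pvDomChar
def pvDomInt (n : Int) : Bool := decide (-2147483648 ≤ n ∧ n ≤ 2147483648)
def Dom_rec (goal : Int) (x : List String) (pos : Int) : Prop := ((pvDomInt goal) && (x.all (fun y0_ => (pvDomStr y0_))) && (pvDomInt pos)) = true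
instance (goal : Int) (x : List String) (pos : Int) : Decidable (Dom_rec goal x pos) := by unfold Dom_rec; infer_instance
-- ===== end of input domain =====

-- B replaces A's non-short-circuiting binary recursion by an explicit worklist with early
-- return on the first success (alternative decomposition, not claimed faster); equivalence
-- is about return values on Pre_rec, which excludes only inputs where A raises.


-- termination helpers for the two ports (cited by name in their decreasing_by)
lemma pvRecTerm {pos : Int} (h : ¬ pos ≤ 0) : (pos - 1).toNat < pos.toNat := by omega

def pvMeasure (stack : List (Int × Int)) : Nat :=
  (stack.map (fun s => 3 ^ (s.2.toNat + 1))).sum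

lemma pvMeasure_pop (g p : Int) (rest : List (Int × Int)) :
    pvMeasure rest < pvMeasure ((g, p) :: rest) := by
  unfold pvMeasure
  simp only [List.map_cons, List.sum_cons]
  have : (0:Nat) < 3 ^ (p.toNat + 1) := by positivity
  omega

lemma pvMeasure_push {p : Int} (hp : ¬ p ≤ 0) (g a b : Int)
    {c : Prop} [Decidable c] (rest : List (Int × Int)) :
    pvMeasure ((a, p - 1) :: ((if c then [(b, p - 1)] else []) ++ rest)) <
      pvMeasure ((g, p) :: rest) := by
  unfold pvMeasure
  simp only [List.map_cons, List.map_append, List.sum_cons, List.sum_append]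
  have hpn : p.toNat = (p - 1).toNat + 1 := by omega
  have hpow : (0:Nat) < 3 ^ ((p - 1).toNat + 1) := by positivity
  rw [hpn]
  split
  · simp only [List.map_cons, List.map_nil, List.sum_cons, List.sum_nil]
    omega
  · simp only [List.map_nil, List.sum_nil]
    omega

-- Exact integer model of the Python expression 'g / d == g // d' (d ≠ 0): the true
-- division is the IEEE-754 binary64 round-to-nearest-even value of the rational g/d
-- (subnormals and signed zero included), compared exactly to the integer g // d.
-- It is exact whenever the division does not raise OverflowError; Pre_rec's magnitude
-- cap keeps every division the two programs perform below that threshold.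
def roundHalfEven (a b : Nat) : Nat :=
  let u := a / b
  let r := a % b
  if 2 * r < b then u else if b < 2 * r then u + 1 else u + u % 2

def fdivEqFloor (g d : Int) : Bool :=
  let q := PySem.Int.floordiv g d
  let a := g.natAbs
  let b := d.natAbs
  if a = 0 then q == 0
  else
    -- L = bit_length a - bit_length b; then 2^E ≤ |g/d| < 2^(E+1)
    let L : Int := (Nat.log2 a : Int) - (Nat.log2 b : Int)
    let E : Int := if b * 2 ^ L.toNat ≤ a * 2 ^ (-L).toNat then L else L - 1
    -- quantum 2^EQ: distance between neighbouring doubles at that magnitude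
    let EQ : Int := if E < -1022 then -1074 else E - 52
    let m := roundHalfEven (a * 2 ^ (-EQ).toNat) (b * 2 ^ EQ.toNat)
    let sm : Int := if decide (g < 0) != decide (d < 0) then -(m : Int) else (m : Int)
    sm * 2 ^ EQ.toNat == q * 2 ^ (-EQ).toNat

-- ===== PORT A =====
-- Literal port of A's recursion.  The float test 'goal / d == goal // d' is ported by the
-- exact model fdivEqFloor above.  Where Python raises (IndexError on x[pos], ValueError
-- from int(), ZeroDivisionError on d = 0, OverflowError inside the float division) the
-- port returns false; Pre_rec excludes those inputs.
def rec (goal : Int) (x : List String) (pos : Int) : Bool :=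
  if goal < 0 then false
  else if pos ≤ 0 then (goal == 0)
  else
    match (PySem.List.pyGet? x pos).bind PySem.Int.ofStr? with
    | none => false          -- IndexError / ValueError: excluded by Pre_rec
    | some d =>
      if d = 0 then false    -- ZeroDivisionError: excluded by Pre_rec
      else if fdivEqFloor goal d then
        rec (goal - d) x (pos - 1) || rec (PySem.Int.floordiv goal d) x (pos - 1)
      else
        rec (goal - d) x (pos - 1)
termination_by pos.toNat
decreasing_by all_goals exact pvRecTerm (by assumption)

-- ===== PORT B =====
-- Worklist loop of Source B: stack of (goal, pos) states (head = top); pop, skip negative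
-- goals, return true on the first state with goal==0 at pos<=0, otherwise push the divide
-- successor (when the float test holds) and then the subtract successor.  int(x[p])
-- failing or d = 0 (a crash in Source B) yields false; excluded by Pre_rec.
def recAltGo (x : List String) : List (Int × Int) → Bool
  | [] => false
  | (g, p) :: rest =>
    if g < 0 then recAltGo x rest
    else if p ≤ 0 then (if g == 0 then true else recAltGo x rest)
    else
      match (PySem.List.pyGet? x p).bind PySem.Int.ofStr? with
      | none => false        -- int(x[p]) raises in Source B: excluded by Pre_rec
      | some d =>
        if d = 0 then false  -- ZeroDivisionError in Source B: excluded by Pre_rec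
        else
          recAltGo x ((g - d, p - 1) ::
            ((if fdivEqFloor g d = true then [(PySem.Int.floordiv g d, p - 1)] else []) ++ rest))
termination_by stack => pvMeasure stack
decreasing_by
  · exact pvMeasure_pop g p rest
  · exact pvMeasure_pop g p rest
  · exact pvMeasure_push (by assumption) _ _ _ _

def rec_alt (goal : Int) (x : List String) (pos : Int) : Bool :=
  recAltGo x [(goal, pos)]

-- ===== PRECONDITION & SPEC =====
-- helper: position i of x parses (Python int()) to a nonzero integer
def entryOK (x : List String) (i : Int) : Bool :=
  match (PySem.List.pyGet? x i).bind PySem.Int.ofStr? with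
  | none => false
  | some d => d != 0

-- helper: |goal| plus the sum of magnitudes of the parsed entries at positions 1..pos —
-- an upper bound on every nonnegative goal either program's search can reach
def sumAbs (goal : Int) (x : List String) (pos : Int) : Int :=
  |goal| + ((((x.take (pos.toNat + 1)).drop 1).map
      (fun s => |(PySem.Int.ofStr? s).getD 0|)).sum)

-- Pre_rec excludes exactly A's crash risks — x[pos] out of range, a non-int or zero entry
-- (IndexError/ValueError/ZeroDivisionError), and magnitudes reaching 2^1023 where the
-- float division can raise OverflowError — stated in closed form over the input, hence
-- conservatively: it also drops inputs whose bad or huge entries are never reached, on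
-- which A and B both return the same value (see the cited examples).
def Pre_rec (goal : Int) (x : List String) (pos : Int) : Prop :=
  pos ≤ 0 ∨ goal < 0 ∨
    (pos < x.length ∧
      (∀ i : Nat, i < x.length → 1 ≤ (i : Int) → (i : Int) ≤ pos → entryOK x i = true) ∧
      sumAbs goal x pos < 2 ^ 1023)
instance (goal : Int) (x : List String) (pos : Int) : Decidable (Pre_rec goal x pos) := by
  unfold Pre_rec; infer_instance

def pvWitness_rec : Int × List String × Int := (0, [], 0)

def Spec_rec (goal : Int) (x : List String) (pos : Int) (out : Bool) : Prop := out = rec_alt goal x pos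
instance (goal : Int) (x : List String) (pos : Int) (out : Bool) : Decidable (Spec_rec goal x pos out) := by unfold Spec_rec; infer_instance

-- ===== CLAIM (what is proved, stated in full; the proofs are below) =====
def Claim_equal_rec : Prop := ∀ (goal : Int) (x : List String) (pos : Int), Dom_rec goal x pos → Pre_rec goal x pos → Spec_rec goal x pos (rec goal x pos)

-- ===== LEMMAS AND PROOFS =====

-- positions 1..p of x all carry nonzero parsed ints (and p is in range) — the part of
-- Pre_rec the agreement proof needs, stated per state so it is preserved by successors
def GoodAt (x : List String) (p : Int) : Prop :=
  p ≤ 0 ∨ (p < x.length ∧ ∀ i : Int, 1 ≤ i → i ≤ p → entryOK x i = true)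

lemma rec_neg {goal : Int} {x : List String} {pos : Int} (h : goal < 0) :
    rec goal x pos = false := by
  rw [rec.eq_def]; simp [h]

lemma rec_base {goal : Int} {x : List String} {pos : Int} (h1 : ¬ goal < 0) (h2 : pos ≤ 0) :
    rec goal x pos = (goal == 0) := by
  rw [rec.eq_def]; simp [h1, h2]

lemma rec_step {goal : Int} {x : List String} {pos : Int} {d : Int}
    (h1 : ¬ goal < 0) (h2 : ¬ pos ≤ 0)
    (hm : (PySem.List.pyGet? x pos).bind PySem.Int.ofStr? = some d) (hd : d ≠ 0) :
    rec goal x pos = (if fdivEqFloor goal d = true then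
        rec (goal - d) x (pos - 1) || rec (PySem.Int.floordiv goal d) x (pos - 1)
      else rec (goal - d) x (pos - 1)) := by
  rw [rec.eq_def]; simp [h1, h2, hm, hd]

lemma goodAt_pred {x : List String} {p : Int} (h : GoodAt x p) : GoodAt x (p - 1) := by
  rcases h with h | ⟨hl, he⟩
  · exact Or.inl (by omega)
  · exact Or.inr ⟨by omega, fun i h1 h2 => he i h1 (by omega)⟩

lemma goodAt_entry {x : List String} {p : Int} (h : GoodAt x p) (hp : ¬ p ≤ 0) :
    ∃ d, (PySem.List.pyGet? x p).bind PySem.Int.ofStr? = some d ∧ d ≠ 0 := by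
  rcases h with h | ⟨_, he⟩
  · omega
  · have := he p (by omega) le_rfl
    unfold entryOK at this
    rcases hm : (PySem.List.pyGet? x p).bind PySem.Int.ofStr? with _ | d
    · rw [hm] at this; simp at this
    · rw [hm] at this; simp at this; exact ⟨d, rfl, this⟩

-- the worklist invariant: on an all-good stack B's loop computes the disjunction of A
-- over the stacked states
lemma go_eq_any (x : List String) (stack : List (Int × Int))
    (hg : ∀ s ∈ stack, GoodAt x s.2) :
    recAltGo x stack = stack.any (fun s => rec s.1 x s.2) := by
  induction stack using recAltGo.induct x with
  | case1 => simp [recAltGo]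
  | case2 g p rest hneg ih =>
    have hrest : ∀ s ∈ rest, GoodAt x s.2 := fun s hs => hg s (List.mem_cons_of_mem _ hs)
    rw [recAltGo.eq_def]
    simp only [List.any_cons, ih hrest, if_pos hneg, rec_neg hneg, Bool.false_or]
  | case3 g p rest hneg hple hz =>
    rw [recAltGo.eq_def]
    simp [hneg, hple, hz, List.any_cons, rec_base hneg hple]
  | case4 g p rest hneg hple hz ih =>
    have hrest : ∀ s ∈ rest, GoodAt x s.2 := fun s hs => hg s (List.mem_cons_of_mem _ hs)
    rw [recAltGo.eq_def]
    simp [hneg, hple, hz, List.any_cons, rec_base hneg hple, ih hrest]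
  | case5 g p rest hneg hple hm =>
    have := goodAt_entry (hg (g, p) List.mem_cons_self) hple
    rw [hm] at this; simp at this
  | case6 g p rest hneg hple hm =>
    have := goodAt_entry (hg (g, p) List.mem_cons_self) hple
    rw [hm] at this
    obtain ⟨d', hd', hne⟩ := this
    simp at hd'; omega
  | case7 g p rest hneg hple d hm hd0 ih =>
    have hhead : GoodAt x p := hg (g, p) List.mem_cons_self
    have hrest : ∀ s ∈ rest, GoodAt x s.2 := fun s hs => hg s (List.mem_cons_of_mem _ hs)
    have hnew : ∀ s ∈ (g - d, p - 1) ::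
        ((if fdivEqFloor g d = true then [(PySem.Int.floordiv g d, p - 1)] else []) ++ rest),
        GoodAt x s.2 := by
      intro s hs
      rcases List.mem_cons.1 hs with rfl | hs
      · exact goodAt_pred hhead
      · rcases List.mem_append.1 hs with hs | hs
        · split at hs <;> simp_all
          exact goodAt_pred hhead
        · exact hrest s hs
    rw [recAltGo.eq_def]
    simp only [hneg, hple, hm, hd0, if_false, List.any_cons]
    simp only [dite_eq_ite] at ih
    rw [ih hnew, rec_step hneg hple hm hd0]
    by_cases hdiv : fdivEqFloor g d = true
    · simp [hdiv, List.any_cons, Bool.or_assoc]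
    · simp [hdiv, List.any_cons]

lemma pre_goodAt {goal : Int} {x : List String} {pos : Int}
    (h : Pre_rec goal x pos) (hg : ¬ goal < 0) : GoodAt x pos := by
  rcases h with h | h | ⟨hl, he, _⟩
  · exact Or.inl h
  · omega
  · refine Or.inr ⟨hl, fun i h1 h2 => ?_⟩
    have hi : i = ((i.toNat : Nat) : Int) := by omega
    rw [hi] at h1 h2 ⊢
    exact he i.toNat (by omega) h1 h2

-- ===== VERDICT (by name: the statement is the Claim_ definition above) =====
theorem rec_spec : Claim_equal_rec := by
  intro goal x pos _ hpre
  unfold Spec_rec rec_alt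
  by_cases hg : goal < 0
  · have hA : rec goal x pos = false := rec_neg hg
    have hB : recAltGo x [(goal, pos)] = false := by
      rw [recAltGo.eq_def]; simp [hg, recAltGo]
    rw [hA, hB]
  · rw [go_eq_any x [(goal, pos)] (by
      intro s hs; simp at hs; subst hs; exact pre_goodAt hpre hg)]
    simp
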